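-- pv_equiv track=rewrite | github.com/mpytel/piGenCode | testCode/pi/defs/piPrintCLI.py | getIndexedStr
-- ===== SOURCE A (Python) =====
-- import math
--
-- def getIndexedStr(strList: list, numOfCol: int = 1, nextLinePadding: int = 0) -> str:
--     """
--     Formats a list of strings into indexed, multi-column output, with optional
--     left padding for lines after the first.
--
--     Args:
--         strList: A list of strings to be formatted.
--         numOfCol: The number of columns to arrange the strings into.
--                   Defaults to 1. Must be a positive integer.
--         nextLinePadding: The number of spaces to pad on the left for every
--                          line except the first. Defaults to 0. Must be a
--                          non-negative integer.
--
--     Returns: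
--         A single formatted string representing the indexed, multi-column output.
--         Returns an empty string if strList is empty.
--     """
--     if not strList:
--         return ""
--
--     if numOfCol <= 0:
--         raise ValueError("numOfCol must be a positive integer.")
--     if nextLinePadding < 0:
--         raise ValueError("nextLinePadding must be a non-negative integer.")
--
--     indexed_items = [f"{i+1}. {item}" for i, item in enumerate(strList)]
--     max_item_len = 0
--     if indexed_items: # Ensure there's at least one item to check its length
--         max_item_len = max(len(item) for item in indexed_items)
--
--     # Calculate column width: max item length + some buffer (e.g., 2 spaces)
--     # This buffer ensures items in adjacent columns don't touch even if they're
--     # exactly the same length.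
--     column_width = max_item_len + 2
--
--     num_rows = math.ceil(len(indexed_items) / numOfCol)
--     output_lines = []
--
--     for row_idx in range(num_rows):
--         current_line_items = []
--         for col_idx in range(numOfCol):
--             # item_index = row_idx + col_idx * num_rows # vertical numbering
--             item_index = row_idx * numOfCol + col_idx # horizontal numbering
--             if item_index < len(indexed_items):
--                 item = indexed_items[item_index]
--                 # Pad individual items to align columns
--                 current_line_items.append(item.ljust(column_width))
--             else:
--                 # Add empty padding for incomplete rows/columns
--                 current_line_items.append(" " * column_width)
--
--         line = "".join(current_line_items).rstrip() # Remove trailing spaces from the last column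
--         if row_idx > 0:
--             output_lines.append(" " * nextLinePadding + line)
--         else:
--             output_lines.append(line)
--
--     return "\n".join(output_lines)
-- ===== SOURCE B (Python) =====
-- def getIndexedStr(strList: list, numOfCol: int = 1, nextLinePadding: int = 0) -> str:
--     """Consume the indexed items chunk by chunk with a while loop instead of
--     computing ceil(num_rows) and running row x column index loops: no blank
--     filler cells and no line-level rstrip -- every cell but the last of a line
--     is left-justified, the last cell is just rstripped itself (a cell always
--     contains '.', so rstrip never eats into earlier cells), and the padding of
--     the lines after the first lives in the join separator."""
--     if not strList:
--         return ""
--     if numOfCol <= 0: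
--         raise ValueError("numOfCol must be a positive integer.")
--     if nextLinePadding < 0:
--         raise ValueError("nextLinePadding must be a non-negative integer.")
--
--     items = [f"{i+1}. {s}" for i, s in enumerate(strList)]
--     width = max(len(it) for it in items) + 2
--
--     lines = []
--     rest = items
--     while rest:
--         chunk, rest = rest[:numOfCol], rest[numOfCol:]
--         head = "".join(it.ljust(width) for it in chunk[:-1])
--         lines.append(head + chunk[-1].rstrip())
--     return ("\n" + " " * nextLinePadding).join(lines)
-- ===== Notes on version B (the rewrite author's own statement) =====
-- stated objective: simpler
-- what changed: Replaces A's ceil-based num_rows computation and row x column index loops (blank filler cells, rstrip of the whole line, per-line pad prefix) with a while loop that consumes the item list in chunks: no ceil, no filler cells, each line is built by padding every cell except the last and rstripping only the last item (valid because every cell contains '.'), and the per-line padding moves into the join separator.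
import Mathlib
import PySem

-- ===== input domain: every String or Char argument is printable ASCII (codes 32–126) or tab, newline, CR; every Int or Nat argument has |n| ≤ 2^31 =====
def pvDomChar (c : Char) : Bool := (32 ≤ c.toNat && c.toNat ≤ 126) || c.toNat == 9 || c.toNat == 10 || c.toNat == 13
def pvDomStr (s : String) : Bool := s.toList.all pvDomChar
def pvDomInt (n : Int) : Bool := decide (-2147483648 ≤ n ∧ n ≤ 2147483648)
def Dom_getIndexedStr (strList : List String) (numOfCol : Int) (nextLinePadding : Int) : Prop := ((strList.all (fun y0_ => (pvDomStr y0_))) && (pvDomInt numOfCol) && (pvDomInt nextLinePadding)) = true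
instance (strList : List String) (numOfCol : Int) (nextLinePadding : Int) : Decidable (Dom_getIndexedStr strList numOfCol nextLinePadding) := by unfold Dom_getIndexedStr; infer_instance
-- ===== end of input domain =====

-- B replaces A's ceil-based row count and row×column index loops (blank filler cells, rstrip of
-- the whole line, per-line pad prefix) by a while loop consuming the items chunk by chunk, padding
-- every cell but the last and rstripping only the last item; objective: simpler.
-- Pre_ excludes only the two ValueError cases, where both Pythons raise.

-- ===== PORT A =====
-- item.ljust(w): pad on the right with spaces to width w (Nat subtraction = Python's max(0, ·));
-- used by both Pythons, which call str.ljust identically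
def pvLjust (s : List Char) (w : Nat) : List Char := s ++ List.replicate (w - s.length) ' '

-- indexed_items = [f"{i+1}. {item}" for i, item in enumerate(strList)]  (this line is verbatim in both Pythons)
def pvItems (strList : List String) : List (List Char) :=
  (PySem.List.enumerate strList 0).map (fun p => (PySem.Int.toStr (p.1 + 1)).toList ++ ('.' :: ' ' :: p.2.toList))

-- column_width = max(len(item) for item in indexed_items) + 2  (verbatim in both Pythons;
-- folding from 0 is exact here: lengths are ≥ 0 and the list is nonempty)
def pvWidth (items : List (List Char)) : Nat := (items.map List.length).foldl max 0 + 2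

-- the inner `for col_idx in range(numOfCol)` loop of A (item_index inlined)
def pvCellsA (items : List (List Char)) (w : Nat) (numOfCol r : Int) : List (List Char) :=
  (PySem.List.pyRange 0 numOfCol 1).foldl (fun cacc c =>
    if r * numOfCol + c < (items.length : Int) then
      cacc ++ [pvLjust (PySem.List.pyGetD items (r * numOfCol + c) []) w]
    else
      cacc ++ [List.replicate w ' ']) []

-- the outer `for row_idx in range(num_rows)` loop of A
def pvLinesA (items : List (List Char)) (w : Nat) (numOfCol pad numRows : Int) : List (List Char) :=
  (PySem.List.pyRange 0 numRows 1).foldl (fun acc r =>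
    let line := PySem.Chars.rstrip (pvCellsA items w numOfCol r).flatten
    if 0 < r then acc ++ [List.replicate pad.toNat ' ' ++ line]
    else acc ++ [line]) []

def getIndexedStr (strList : List String) (numOfCol : Int) (nextLinePadding : Int) : String :=
  if strList = [] then "" else
  if numOfCol ≤ 0 then "" else          -- ValueError in Python: excluded by Pre_
  if nextLinePadding < 0 then "" else   -- ValueError in Python: excluded by Pre_
  let items := pvItems strList
  let w := pvWidth items
  -- num_rows = math.ceil(len / numOfCol), exact as integer ceiling division at these magnitudes
  let numRows : Int := -(PySem.Int.floordiv (-(items.length : Int)) numOfCol)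
  String.ofList (PySem.Chars.join ['\n'] (pvLinesA items w numOfCol nextLinePadding numRows))

-- ===== PORT B =====
-- one line of B: head = "".join(it.ljust(width) for it in chunk[:-1]); head + chunk[-1].rstrip()
def pvFmtB (w : Nat) (chunk : List (List Char)) : List Char :=
  ((PySem.List.slice chunk none (some (-1))).map (fun it => pvLjust it w)).flatten
    ++ PySem.Chars.rstrip (PySem.List.pyGetD chunk (-1) [])

-- B's `while rest:` loop: chunk, rest = rest[:numOfCol], rest[numOfCol:].
-- `drop (max k 1)` = rest[numOfCol:] on every reachable call (the guard gives numOfCol ≥ 1,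
-- so max k 1 = k); the `max` only makes the k = 0 case, where Python would loop forever
-- behind the ValueError guard, terminate in Lean.
def pvLinesB (w k : Nat) : List (List Char) → List (List Char)
  | [] => []
  | x :: rest =>
      pvFmtB w ((x :: rest).take k) :: pvLinesB w k ((x :: rest).drop (max k 1))
  termination_by l => l.length
  decreasing_by simp

def getIndexedStr_alt (strList : List String) (numOfCol : Int) (nextLinePadding : Int) : String :=
  if strList = [] then "" else
  if numOfCol ≤ 0 then "" else          -- ValueError in Python: excluded by Pre_
  if nextLinePadding < 0 then "" else   -- ValueError in Python: excluded by Pre_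
  let items := pvItems strList
  let w := pvWidth items
  String.ofList (PySem.Chars.join ('\n' :: List.replicate nextLinePadding.toNat ' ')
    (pvLinesB w numOfCol.toNat items))

-- ===== PRECONDITION & SPEC =====
-- Pre_ excludes exactly the inputs on which A raises ValueError: a nonempty list with
-- numOfCol ≤ 0 or nextLinePadding < 0 (on the empty list A returns "" regardless).
def Pre_getIndexedStr (strList : List String) (numOfCol : Int) (nextLinePadding : Int) : Prop :=
  strList = [] ∨ (0 < numOfCol ∧ 0 ≤ nextLinePadding)
instance (strList : List String) (numOfCol : Int) (nextLinePadding : Int) : Decidable (Pre_getIndexedStr strList numOfCol nextLinePadding) := by unfold Pre_getIndexedStr; infer_instance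

def pvWitness_getIndexedStr : List String × Int × Int := (["ab", "c", "de", "f", "g"], 2, 4)

def Spec_getIndexedStr (strList : List String) (numOfCol : Int) (nextLinePadding : Int) (out : String) : Prop := out = getIndexedStr_alt strList numOfCol nextLinePadding
instance (strList : List String) (numOfCol : Int) (nextLinePadding : Int) (out : String) : Decidable (Spec_getIndexedStr strList numOfCol nextLinePadding out) := by unfold Spec_getIndexedStr; infer_instance

-- ===== CLAIM (what is proved, stated in full; the proofs are below) =====
def Claim_equal_getIndexedStr : Prop := ∀ (strList : List String) (numOfCol : Int) (nextLinePadding : Int), Dom_getIndexedStr strList numOfCol nextLinePadding → Pre_getIndexedStr strList numOfCol nextLinePadding → Spec_getIndexedStr strList numOfCol nextLinePadding (getIndexedStr strList numOfCol nextLinePadding)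

-- ===== LEMMAS AND PROOFS =====

-- a foldl that appends exactly one element per step, whichever branch fires, is a map
theorem pvFoldl_append_if {α β : Type} (p : α → Prop) [DecidablePred p] (f g : α → β)
    (l : List α) (acc : List β) :
    l.foldl (fun acc x => if p x then acc ++ [f x] else acc ++ [g x]) acc
      = acc ++ l.map (fun x => if p x then f x else g x) := by
  induction l generalizing acc with
  | nil => simp
  | cons x t ih => by_cases h : p x <;> simp [h, ih, List.append_assoc]

-- rstrip ignores a trailing run of spaces
theorem pvRstrip_append_spaces (x : List Char) (m : Nat) :
    PySem.Chars.rstrip (x ++ List.replicate m ' ') = PySem.Chars.rstrip x := by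
  unfold PySem.Chars.rstrip
  rw [List.reverse_append, List.reverse_replicate]
  congr 1
  induction m with
  | zero => simp
  | succ k ih => simpa [List.replicate_succ] using ih

-- rstrip of an append keeps the left part intact when the right part does not strip to nothing
theorem pvRstrip_append_left (a b : List Char) (hb : PySem.Chars.rstrip b ≠ []) :
    PySem.Chars.rstrip (a ++ b) = a ++ PySem.Chars.rstrip b := by
  unfold PySem.Chars.rstrip at *
  rw [List.reverse_append, List.dropWhile_append]
  have h : (List.dropWhile PySem.Chars.isspace b.reverse).isEmpty = false := by
    cases h' : List.dropWhile PySem.Chars.isspace b.reverse with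
    | nil => exact absurd (by simp [h']) hb
    | cons _ _ => simp
  rw [h]
  simp

-- a list containing a non-whitespace character does not rstrip to nothing
theorem pvRstrip_ne_nil (b : List Char) (c : Char) (hc : c ∈ b)
    (hs : PySem.Chars.isspace c = false) : PySem.Chars.rstrip b ≠ [] := by
  unfold PySem.Chars.rstrip
  intro h
  rw [List.reverse_eq_nil_iff, List.dropWhile_eq_nil_iff] at h
  have := h c (by simp [hc])
  simp [hs] at this

-- every indexed item contains the '.' after its number
theorem pvItems_mem_dot (strList : List String) (it : List Char) (h : it ∈ pvItems strList) :
    ('.' : Char) ∈ it := by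
  unfold pvItems at h
  obtain ⟨p, _, rfl⟩ := List.mem_map.mp h
  simp

-- one row of A's guarded cells = the row chunk's ljusts followed by all-blank cells
theorem pvRow_eq (items : List (List Char)) (w : Nat) :
    ∀ (k s : Nat),
      (List.range k).map (fun c => if s + c < items.length
          then pvLjust (items.getD (s + c) []) w else List.replicate w ' ')
        = ((items.drop s).take k).map (fun it => pvLjust it w)
          ++ List.replicate (k - ((items.drop s).take k).length) (List.replicate w ' ') := by
  intro k
  induction k with
  | zero => intro s; simp
  | succ k ih =>
    intro s
    rw [List.range_succ_eq_map, List.map_cons, List.map_map]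
    have hfun : ((fun c => if (s + c : Nat) < items.length
        then pvLjust (items.getD (s + c) []) w else List.replicate w ' ') ∘ Nat.succ)
        = (fun c => if ((s+1) + c : Nat) < items.length
        then pvLjust (items.getD ((s+1) + c) []) w else List.replicate w ' ') := by
      funext c
      have e : s + (c + 1) = s + 1 + c := by omega
      simp only [Function.comp, Nat.succ_eq_add_one, e]
    rw [hfun, ih (s+1)]
    by_cases h : s < items.length
    · have hd : items.drop s = items[s] :: items.drop (s + 1) := by
        rw [List.drop_eq_getElem_cons h]
      rw [hd, List.take_succ_cons, List.map_cons]
      have h0 : s + 0 < items.length := by omega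
      rw [if_pos h0]
      have hg : items.getD (s + 0) [] = items[s] := by
        rw [List.getD_eq_getElem?_getD]
        simp [h]
      rw [hg, List.length_cons, List.cons_append]
      have : k + 1 - ((List.take k (items.drop (s+1))).length + 1)
           = k - (List.take k (items.drop (s+1))).length := by omega
      rw [this]
    · have hd : items.drop s = [] := by
        apply List.drop_eq_nil_of_le; omega
      have hd1 : items.drop (s+1) = [] := by
        apply List.drop_eq_nil_of_le; omega
      simp [hd, hd1, h, List.replicate_succ]

-- flatten distributes over the blank-cell suffix
theorem pvFlatten_blank (X : List (List Char)) (m w : Nat) :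
    (X ++ List.replicate m (List.replicate w ' ')).flatten
      = X.flatten ++ List.replicate (m * w) ' ' := by
  rw [List.flatten_append]
  congr 1
  induction m with
  | zero => simp
  | succ k ih =>
    rw [List.replicate_succ, List.flatten_cons, ih, ← List.replicate_add]
    congr 1
    ring

-- one row, cast form: A's inner loop result, rstripped, is the chunk's rstripped line
theorem pvLine_eq (items : List (List Char)) (w kN s : Nat) :
    PySem.Chars.rstrip (((List.range kN).map (fun (c : Nat) =>
        if ((s : Int) + (c : Int) < (items.length : Int))
        then pvLjust (PySem.List.pyGetD items ((s : Int) + (c : Int)) []) w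
        else List.replicate w ' ')).flatten)
      = PySem.Chars.rstrip (((items.drop s).take kN).map (fun it => pvLjust it w)).flatten := by
  have hmap : (List.range kN).map (fun (c : Nat) =>
        if ((s : Int) + (c : Int) < (items.length : Int))
        then pvLjust (PySem.List.pyGetD items ((s : Int) + (c : Int)) []) w
        else List.replicate w ' ')
      = (List.range kN).map (fun c => if s + c < items.length
          then pvLjust (items.getD (s + c) []) w else List.replicate w ' ') := by
    apply List.map_congr_left
    intro c _
    simp only [← Nat.cast_add, PySem.List.pyGetD_natCast, Nat.cast_lt]
  rw [hmap, pvRow_eq, pvFlatten_blank, pvRstrip_append_spaces]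

-- sep.intercalate (a :: b :: t) unfolds one step
theorem pvIntercalate_cons₂ (sep a b : List Char) (t : List (List Char)) :
    sep.intercalate (a :: b :: t) = a ++ sep ++ sep.intercalate (b :: t) := by
  simp [List.intercalate, List.intersperse]

-- an append in the head slides out of intercalate
theorem pvIntercalate_head_append (sep x a : List Char) (t : List (List Char)) :
    sep.intercalate ((x ++ a) :: t) = x ++ sep.intercalate (a :: t) := by
  cases t with
  | nil => simp [List.intercalate]
  | cons b t => rw [pvIntercalate_cons₂, pvIntercalate_cons₂]; simp [List.append_assoc]

-- joining pad-prefixed tails with '\n' = joining the raw lines with '\n' ++ pad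
theorem pvJoin_pad (pad : List Char) (l0 : List Char) (ls : List (List Char)) :
    PySem.Chars.join ['\n'] (l0 :: ls.map (fun l => pad ++ l))
      = PySem.Chars.join ('\n' :: pad) (l0 :: ls) := by
  unfold PySem.Chars.join
  induction ls generalizing l0 with
  | nil => simp [List.intercalate]
  | cons b t ih =>
    rw [List.map_cons, pvIntercalate_cons₂, pvIntercalate_cons₂,
        pvIntercalate_head_append, ih b]
    simp [List.append_assoc]

-- the ceiling-of-a-quotient: -((-n) // k) = (n + k - 1) / k for positive k
theorem pvNumRows_eq (n k : Int) (hk : 0 < k) :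
    -(PySem.Int.floordiv (-n) k) = (n + k - 1) / k := by
  rw [PySem.Int.neg_floordiv_neg_eq_iff_of_pos hk]
  have h1 := Int.ediv_add_emod (n + k - 1) k
  have hr0 : 0 ≤ (n + k - 1) % k := Int.emod_nonneg _ (ne_of_gt hk)
  have hrk : (n + k - 1) % k < k := Int.emod_lt_of_pos _ hk
  constructor <;> nlinarith [h1, hr0, hrk]

-- the indexed-item list of a nonempty list is nonempty
theorem pvItems_ne_nil (s : String) (t : List String) : pvItems (s :: t) ≠ [] := by
  simp [pvItems, PySem.List.enumerate]

-- A's inner cell loop, written as a map over Nat column indices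
theorem pvCellsA_eq (items : List (List Char)) (w kN j : Nat) :
    pvCellsA items w (kN : Int) (j : Int)
      = (List.range kN).map (fun (c : Nat) =>
          if (((j * kN : Nat) : Int) + (c : Int) < (items.length : Int))
          then pvLjust (PySem.List.pyGetD items (((j * kN : Nat) : Int) + (c : Int)) []) w
          else List.replicate w ' ') := by
  unfold pvCellsA
  rw [pvFoldl_append_if (fun c => (j : Int) * (kN : Int) + c < (items.length : Int))
      (fun c => pvLjust (PySem.List.pyGetD items ((j : Int) * (kN : Int) + c) []) w)
      (fun _ => List.replicate w ' ')]
  rw [PySem.List.pyRange_zero_nat, List.map_map, List.nil_append]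
  apply List.map_congr_left
  intro c _
  have e : (j : Int) * (kN : Int) + (c : Int) = ((j * kN : Nat) : Int) + (c : Int) := by
    push_cast; ring
  simp only [Function.comp, e]

-- one full row of A, rstripped, equals the chunk's rstripped line
theorem pvLineA_eq (items : List (List Char)) (w kN j : Nat) :
    PySem.Chars.rstrip (pvCellsA items w (kN : Int) (j : Int)).flatten
      = PySem.Chars.rstrip (((items.drop (j * kN)).take kN).map (fun it => pvLjust it w)).flatten := by
  rw [pvCellsA_eq]
  exact pvLine_eq items w kN (j * kN)

-- A's outer line loop, written as a map over Nat row indices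
theorem pvLinesA_eq (items : List (List Char)) (w : Nat) (kI pI : Int) (R : Nat) :
    pvLinesA items w kI pI (R : Int)
      = (List.range R).map (fun (j : Nat) =>
          if 0 < (j : Int)
          then List.replicate pI.toNat ' ' ++ PySem.Chars.rstrip (pvCellsA items w kI (j : Int)).flatten
          else PySem.Chars.rstrip (pvCellsA items w kI (j : Int)).flatten) := by
  unfold pvLinesA
  rw [PySem.List.pyRange_zero_nat, List.foldl_map]
  rw [pvFoldl_append_if (fun (j : Nat) => 0 < (j : Int))
      (fun j => List.replicate pI.toNat ' ' ++ PySem.Chars.rstrip (pvCellsA items w kI (j : Int)).flatten)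
      (fun j => PySem.Chars.rstrip (pvCellsA items w kI (j : Int)).flatten)]
  simp

-- the pad-prefixing of every row after the first moves into the join separator
theorem pvJoin_lines (padL : List Char) (f : Nat → List Char) (R : Nat) (hR : 0 < R) :
    PySem.Chars.join ['\n'] ((List.range R).map (fun (j : Nat) => if 0 < (j : Int) then padL ++ f j else f j))
      = PySem.Chars.join ('\n' :: padL) ((List.range R).map f) := by
  obtain ⟨R', rfl⟩ : ∃ R', R = R' + 1 := ⟨R - 1, by omega⟩
  rw [List.range_succ_eq_map, List.map_cons, List.map_cons, List.map_map, List.map_map]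
  have hfun : ((fun (j : Nat) => if 0 < (j : Int) then padL ++ f j else f j) ∘ Nat.succ)
      = (fun j => padL ++ f (j + 1)) := by
    funext j
    simp [Function.comp, Nat.succ_eq_add_one]
  rw [hfun]
  simp only [if_false, Nat.cast_zero, lt_self_iff_false]
  have hsplit : (List.range R').map (fun j => padL ++ f (j + 1))
      = ((List.range R').map (fun j => f (j + 1))).map (fun l => padL ++ l) := by
    rw [List.map_map]
    rfl
  rw [hsplit, pvJoin_pad]
  congr 1

-- B's per-line formatter equals A's per-line rstrip of the fully padded chunk
theorem pvFmtB_eq (w : Nat) (chunk : List (List Char)) (hne : chunk ≠ [])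
    (hit : ∀ it ∈ chunk, PySem.Chars.rstrip it ≠ []) :
    pvFmtB w chunk
      = PySem.Chars.rstrip ((chunk.map (fun it => pvLjust it w)).flatten) := by
  unfold pvFmtB
  rw [PySem.List.slice_to_neg_one,
      show PySem.List.pyGetD chunk (-1) [] = chunk.getLast hne from
        PySem.List.pyGetD_neg_one chunk [] hne]
  conv_rhs => rw [← List.dropLast_append_getLast hne]
  rw [List.map_append, List.flatten_append]
  have hlast : PySem.Chars.rstrip (pvLjust (chunk.getLast hne) w)
      = PySem.Chars.rstrip (chunk.getLast hne) := pvRstrip_append_spaces _ _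
  have hne' : PySem.Chars.rstrip (pvLjust (chunk.getLast hne) w) ≠ [] := by
    rw [hlast]
    exact hit _ (List.getLast_mem hne)
  have hfl : ([chunk.getLast hne].map (fun it => pvLjust it w)).flatten
      = pvLjust (chunk.getLast hne) w := by simp
  rw [hfl, pvRstrip_append_left _ _ hne', hlast]

-- B's while loop produces exactly the rstripped line of every successive chunk
theorem pvLinesB_eq (w k : Nat) (hk : 1 ≤ k) :
    ∀ (n : Nat) (l : List (List Char)), l.length = n →
      (∀ it ∈ l, PySem.Chars.rstrip it ≠ []) →
      pvLinesB w k l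
        = (List.range ((l.length + k - 1) / k)).map
            (fun j => PySem.Chars.rstrip
              ((((l.drop (j * k)).take k).map (fun it => pvLjust it w)).flatten)) := by
  intro n
  induction n using Nat.strong_induction_on with
  | _ n ih =>
    intro l hlen hit
    cases l with
    | nil =>
      rw [pvLinesB.eq_def]
      simp [Nat.div_eq_of_lt (show k - 1 < k by omega)]
    | cons x rest =>
      have hmax : max k 1 = k := by omega
      have hkpos : 0 < k := hk
      have hstep : pvLinesB w k (x :: rest)
          = pvFmtB w ((x :: rest).take k) :: pvLinesB w k ((x :: rest).drop (max k 1)) := by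
        rw [pvLinesB.eq_def]
      rw [hstep, hmax]
      have hlen2 : rest.length + 1 = n := by simpa using hlen
      have hlen' : ((x :: rest).drop k).length = (rest.length + 1) - k := by
        simp
      have hdec : ((x :: rest).drop k).length < n := by
        rw [hlen']
        omega
      have hit' : ∀ it ∈ (x :: rest).drop k, PySem.Chars.rstrip it ≠ [] :=
        fun it hm => hit it (List.mem_of_mem_drop hm)
      rw [ih _ hdec _ rfl hit']
      -- row counts: ceil((m+1)/k) = ceil((m+1-k)/k) + 1
      have hR : ((x :: rest).length + k - 1) / k
          = (((x :: rest).drop k).length + k - 1) / k + 1 := by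
        rw [hlen', List.length_cons]
        by_cases hle : rest.length + 1 ≤ k
        · have h1 : (rest.length + 1 - k + k - 1) / k = 0 :=
            Nat.div_eq_of_lt (by omega)
          have h2 : (rest.length + 1 + k - 1) / k = 1 := by
            have e1 : rest.length + 1 + k - 1 = rest.length + k := by omega
            rw [e1, Nat.add_div_right _ hkpos, Nat.div_eq_of_lt (by omega)]
          omega
        · have e1 : rest.length + 1 + k - 1 = rest.length + k := by omega
          have e2 : rest.length + 1 - k + k - 1 = rest.length := by omega
          rw [e1, e2, Nat.add_div_right _ hkpos]
      rw [hR, List.range_succ_eq_map, List.map_cons, List.map_map]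
      congr 1
      · -- head line: the first chunk
        rw [pvFmtB_eq w _ (by simp [List.take_eq_nil_iff]; omega)
            (fun it hm => hit it (List.mem_of_mem_take hm))]
        simp
      · -- tail lines: shift by one chunk
        apply List.map_congr_left
        intro j _
        simp only [Function.comp, Nat.succ_eq_add_one]
        have hdd : List.drop (j * k) (List.drop k (x :: rest))
            = List.drop ((j + 1) * k) (x :: rest) := by
          rw [List.drop_drop]
          congr 1
          ring
        rw [hdd]

-- ===== VERDICT (by name: the statement is the Claim_ definition above) =====
theorem getIndexedStr_spec : Claim_equal_getIndexedStr := by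
  intro strList kI pI hDom hPre
  unfold Spec_getIndexedStr
  by_cases hnil : strList = []
  · simp [getIndexedStr, getIndexedStr_alt, hnil]
  · have hkp : 0 < kI ∧ 0 ≤ pI := hPre.resolve_left hnil
    obtain ⟨hk, hp⟩ := hkp
    obtain ⟨kN, rfl⟩ : ∃ kN : Nat, kI = (kN : Int) := ⟨kI.toNat, (Int.toNat_of_nonneg hk.le).symm⟩
    obtain ⟨pN, rfl⟩ : ∃ pN : Nat, pI = (pN : Int) := ⟨pI.toNat, (Int.toNat_of_nonneg hp).symm⟩
    have hkN : 0 < kN := by exact_mod_cast hk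
    have hn : 0 < (pvItems strList).length := by
      cases strList with
      | nil => exact absurd rfl hnil
      | cons s t => exact List.length_pos_of_ne_nil (pvItems_ne_nil s t)
    have hk' : ¬ ((kN : Int) ≤ 0) := not_le.mpr hk
    have hp' : ¬ ((pN : Int) < 0) := not_lt.mpr hp
    simp only [getIndexedStr, getIndexedStr_alt, if_neg hnil, if_neg hk', if_neg hp']
    have hRpos : 0 < ((pvItems strList).length + kN - 1) / kN :=
      (Nat.one_le_div_iff hkN).mpr (by omega)
    have hnrows : -(PySem.Int.floordiv (-((pvItems strList).length : Int)) (kN : Int))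
        = ((((pvItems strList).length + kN - 1) / kN : Nat) : Int) := by
      rw [pvNumRows_eq _ _ (by exact_mod_cast hkN)]
      have hcast : (((pvItems strList).length + kN - 1 : Nat) : Int)
          = ((pvItems strList).length : Int) + (kN : Int) - 1 := by omega
      have hdiv : (((((pvItems strList).length + kN - 1) / kN : Nat)) : Int)
          = (((pvItems strList).length + kN - 1 : Nat) : Int) / (kN : Int) := by push_cast; ring
      rw [hdiv, hcast]
    rw [hnrows, pvLinesA_eq, pvJoin_lines _ _ _ hRpos]
    congr 1
    have hitems : ∀ it ∈ pvItems strList, PySem.Chars.rstrip it ≠ [] := fun it hm =>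
      pvRstrip_ne_nil it '.' (pvItems_mem_dot _ _ hm) (by decide)
    have htoNat : ((kN : Int)).toNat = kN := by simp
    rw [htoNat, pvLinesB_eq _ _ hkN _ (pvItems strList) rfl hitems]
    congr 1
    apply List.map_congr_left
    intro j _
    exact pvLineA_eq _ _ _ _
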